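-- pv_equiv track=rewrite | github.com/manya706/DSA-Codebase | TLE_sheet/contest/Codeforces Round 938 (Div. 3)/B.py | construct_matrix
-- ===== SOURCE A (Python) =====
-- def construct_matrix(n, c, d, a):
--     a11 = min(a)
--     m = [[0] * n for _ in range(n)]
--     m[0][0] = a11
--     for j in range(1, n):
--         m[0][j] = m[0][j - 1] + c
--     for i in range(1, n):
--         m[i][0] = m[i - 1][0] + d
--         for j in range(1, n):
--             m[i][j] = m[i][j - 1] + c
--     return m
-- ===== SOURCE B (Python) =====
-- def construct_matrix(n, c, d, a):
--     a11 = min(a)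
--     return [[a11 + i * d + j * c for j in range(n)] for i in range(n)]
-- ===== Notes on version B (the rewrite author's own statement) =====
-- stated objective: simpler
-- what changed: Each cell is computed directly from its indices by the closed form a11 + i*d + j*c in one nested comprehension, instead of allocating a zero matrix and accumulating every cell from its left/top neighbour with three loops.
import Mathlib
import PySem

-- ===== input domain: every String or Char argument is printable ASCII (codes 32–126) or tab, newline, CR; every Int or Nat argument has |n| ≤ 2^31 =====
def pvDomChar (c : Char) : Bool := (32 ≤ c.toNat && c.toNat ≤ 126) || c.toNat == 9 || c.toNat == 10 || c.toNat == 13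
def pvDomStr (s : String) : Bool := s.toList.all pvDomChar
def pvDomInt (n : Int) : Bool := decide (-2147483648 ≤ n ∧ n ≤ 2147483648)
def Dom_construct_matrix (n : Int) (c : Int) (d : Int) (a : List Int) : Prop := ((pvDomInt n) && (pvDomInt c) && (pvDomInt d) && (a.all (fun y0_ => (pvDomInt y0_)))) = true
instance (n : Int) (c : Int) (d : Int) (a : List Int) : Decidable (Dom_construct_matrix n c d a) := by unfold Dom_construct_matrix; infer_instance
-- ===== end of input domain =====

-- B replaces A's neighbour-accumulating triple loop by the closed form a11 + i*d + j*c per cell (simpler; same cost).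

-- ===== PORT A =====
-- row step of 'for j in range(1, n): m[i][j] = m[i][j-1] + c' acting on row r
def pvRowStep (c : Int) (r : List Int) (j : Int) : List Int :=
  PySem.List.pySetD r j (PySem.List.pyGetD r (j - 1) 0 + c)

-- one iteration of the inner j-loop acting on the whole matrix (reads and writes row i)
def pvInnerBody (c : Int) (i : Int) (m : List (List Int)) (j : Int) : List (List Int) :=
  PySem.List.pySetD m i (pvRowStep c (PySem.List.pyGetD m i []) j)

-- one iteration of the outer i-loop: m[i][0] = m[i-1][0] + d, then the inner j-loop
def pvOuterBody (n : Int) (c : Int) (d : Int) (m : List (List Int)) (i : Int) : List (List Int) :=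
  let m' := PySem.List.pySetD m i
    (PySem.List.pySetD (PySem.List.pyGetD m i [])
      0 (PySem.List.pyGetD (PySem.List.pyGetD m (i - 1) []) 0 0 + d))
  (PySem.List.pyRange 1 n).foldl (pvInnerBody c i) m'

def construct_matrix (n : Int) (c : Int) (d : Int) (a : List Int) : List (List Int) :=
  let a11 := (PySem.List.min? a id).getD 0        -- min(a); Pre_ demands a ≠ []
  let m0 := (PySem.List.pyRange 0 n).map (fun _ => List.replicate n.toNat 0)   -- [[0]*n for _ in range(n)]
  let m1 := PySem.List.pySetD m0 0 (PySem.List.pySetD (PySem.List.pyGetD m0 0 []) 0 a11)  -- m[0][0] = a11; Pre_ demands 1 ≤ n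
  let m2 := (PySem.List.pyRange 1 n).foldl (pvInnerBody c 0) m1               -- first j-loop on row 0
  (PySem.List.pyRange 1 n).foldl (pvOuterBody n c d) m2                       -- outer i-loop

-- ===== PORT B =====
def construct_matrix_alt (n : Int) (c : Int) (d : Int) (a : List Int) : List (List Int) :=
  let a11 := (PySem.List.min? a id).getD 0        -- min(a)
  (PySem.List.pyRange 0 n).map (fun i => (PySem.List.pyRange 0 n).map (fun j => a11 + i * d + j * c))

-- ===== PRECONDITION & SPEC =====
-- Pre_ excludes exactly the inputs where Python A raises: empty a (ValueError from min) and n ≤ 0 (IndexError at m[0][0]).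
def Pre_construct_matrix (n : Int) (c : Int) (d : Int) (a : List Int) : Prop := a ≠ [] ∧ 1 ≤ n
instance (n : Int) (c : Int) (d : Int) (a : List Int) : Decidable (Pre_construct_matrix n c d a) := by unfold Pre_construct_matrix; infer_instance
def pvWitness_construct_matrix : Int × Int × Int × List Int := (3, 2, 5, [7, 4, 9])

def Spec_construct_matrix (n : Int) (c : Int) (d : Int) (a : List Int) (out : List (List Int)) : Prop := out = construct_matrix_alt n c d a
instance (n : Int) (c : Int) (d : Int) (a : List Int) (out : List (List Int)) : Decidable (Spec_construct_matrix n c d a out) := by unfold Spec_construct_matrix; infer_instance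

-- ===== CLAIM (what is proved, stated in full; the proofs are below) =====
def Claim_equal_construct_matrix : Prop := ∀ (n : Int) (c : Int) (d : Int) (a : List Int), Dom_construct_matrix n c d a → Pre_construct_matrix n c d a → Spec_construct_matrix n c d a (construct_matrix n c d a)

-- ===== LEMMAS AND PROOFS =====

lemma pvRow_fill (c : Int) (s : Int) (N : Nat) (_hN : 1 ≤ N) :
    ∀ (t : Nat), 1 ≤ t → t ≤ N →
    (PySem.List.pyRange 1 (t : Int)).foldl (pvRowStep c) (s :: List.replicate (N - 1) 0)
      = (List.range t).map (fun (j : Nat) => s + (j : Int) * c) ++ List.replicate (N - t) 0 := by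
  intro t h1 ht
  induction t, h1 using Nat.le_induction with
  | base =>
    rw [PySem.List.pyRange_one_eq_nil (by norm_num)]
    simp
  | succ t h1 ih =>
    have ht' : t ≤ N := by omega
    have hr : PySem.List.pyRange 1 ((t + 1 : Nat) : Int) = PySem.List.pyRange 1 (t : Int) ++ [(t : Int)] := by
      push_cast
      exact PySem.List.pyRange_one_succ_right (by exact_mod_cast h1)
    rw [hr, List.foldl_append, ih ht', List.foldl_cons, List.foldl_nil]
    unfold pvRowStep
    have h1' : ((t : Int) - 1) = ((t - 1 : Nat) : Int) := by omega
    rw [h1', PySem.List.pyGetD_natCast]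
    have hget : ((List.range t).map (fun (j : Nat) => s + (j : Int) * c) ++ List.replicate (N - t) 0).getD (t - 1) 0
        = s + ((t - 1 : Nat) : Int) * c := by
      rw [List.getD_eq_getElem _ _ (by simp; omega), List.getElem_append_left (by simp; omega)]
      simp
    rw [hget, PySem.List.pySetD_natCast]
    have hrep : List.replicate (N - t) (0 : Int) = 0 :: List.replicate (N - (t + 1)) 0 := by
      have : N - t = (N - (t + 1)) + 1 := by omega
      rw [this, List.replicate_succ]
    rw [hrep]
    have hlen : t = ((List.range t).map (fun (j : Nat) => s + (j : Int) * c)).length := by simp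
    rw [List.range_succ, List.map_append]
    have : ((List.range t).map (fun (j : Nat) => s + (j : Int) * c) ++ 0 :: List.replicate (N - (t + 1)) 0).set t (s + ((t - 1 : Nat) : Int) * c + c)
        = (List.range t).map (fun (j : Nat) => s + (j : Int) * c) ++ (s + ((t - 1 : Nat) : Int) * c + c) :: List.replicate (N - (t + 1)) 0 := by
      conv_lhs => rw [hlen]
      simp
    rw [this]
    have : s + ((t - 1 : Nat) : Int) * c + c = s + (t : Int) * c := by
      have : ((t - 1 : Nat) : Int) = (t : Int) - 1 := by omega
      rw [this]; ring
    rw [this]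
    simp

lemma pvGetD_setD_self {α : Type} (xs : List α) (i : Int) (v dv : α)
    (h0 : 0 ≤ i) (h : i < (xs.length : Int)) :
    PySem.List.pyGetD (PySem.List.pySetD xs i v) i dv = v := by
  rw [PySem.List.pySetD_of_nonneg xs v h0,
      PySem.List.pyGetD_eq_getElem _ dv h0 (by simpa using h)]
  exact List.getElem_set_self (by simp; omega)

lemma pvSetD_setD_self (xs : List (List Int)) (i : Int) (v w : List Int) (h0 : 0 ≤ i) :
    PySem.List.pySetD (PySem.List.pySetD xs i v) i w = PySem.List.pySetD xs i w := by
  rw [PySem.List.pySetD_of_nonneg xs v h0, PySem.List.pySetD_of_nonneg _ w h0,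
      PySem.List.pySetD_of_nonneg xs w h0, List.set_set]

lemma pvFoldl_innerBody_set (c : Int) (i : Int) (h0 : 0 ≤ i) (js : List Int) :
    ∀ (m : List (List Int)) (r : List Int), i < (m.length : Int) →
    js.foldl (pvInnerBody c i) (PySem.List.pySetD m i r)
      = PySem.List.pySetD m i (js.foldl (pvRowStep c) r) := by
  induction js with
  | nil => intro m r _; rfl
  | cons j js ih =>
    intro m r him
    have hg : PySem.List.pyGetD (PySem.List.pySetD m i r) i ([] : List Int) = r :=
      pvGetD_setD_self m i r [] h0 him
    simp only [List.foldl_cons, pvInnerBody, hg, pvSetD_setD_self m i r _ h0]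
    exact ih m _ him

lemma pvSet_append_len {α : Type} (X : List α) (y v : α) (Y : List α) :
    (X ++ y :: Y).set X.length v = X ++ v :: Y := by simp

lemma pvOuter_inv (a11 c d : Int) (N : Nat) (hN : 1 ≤ N) :
    ∀ (t : Nat), 1 ≤ t → t ≤ N →
    (PySem.List.pyRange 1 (t : Int)).foldl (pvOuterBody (N : Int) c d)
        ((List.range 1).map (fun (i : Nat) => (List.range N).map (fun (j : Nat) => a11 + (i : Int) * d + (j : Int) * c))
          ++ List.replicate (N - 1) (List.replicate N 0))
      = (List.range t).map (fun (i : Nat) => (List.range N).map (fun (j : Nat) => a11 + (i : Int) * d + (j : Int) * c))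
          ++ List.replicate (N - t) (List.replicate N 0) := by
  intro t h1 ht
  induction t, h1 using Nat.le_induction with
  | base =>
    rw [PySem.List.pyRange_one_eq_nil (by norm_num)]
    rfl
  | succ t h1 ih =>
    have ht' : t ≤ N := by omega
    have hr : PySem.List.pyRange 1 ((t + 1 : Nat) : Int) = PySem.List.pyRange 1 (t : Int) ++ [(t : Int)] := by
      push_cast
      exact PySem.List.pyRange_one_succ_right (by exact_mod_cast h1)
    rw [hr, List.foldl_append, ih ht', List.foldl_cons, List.foldl_nil]
    set A := (List.range t).map (fun (i : Nat) => (List.range N).map (fun (j : Nat) => a11 + (i : Int) * d + (j : Int) * c)) with hA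
    have hAlen : A.length = t := by simp [hA]
    -- the state the outer body sees
    unfold pvOuterBody
    have hlenM : (A ++ List.replicate (N - t) (List.replicate N (0:Int))).length = N := by
      simp [hAlen]; omega
    -- m[i-1]
    have hprev : PySem.List.pyGetD (A ++ List.replicate (N - t) (List.replicate N (0:Int))) ((t : Int) - 1) []
        = (List.range N).map (fun (j : Nat) => a11 + ((t - 1 : Nat) : Int) * d + (j : Int) * c) := by
      have h1' : ((t : Int) - 1) = ((t - 1 : Nat) : Int) := by omega
      rw [h1', PySem.List.pyGetD_natCast, List.getD_eq_getElem _ _ (by rw [hlenM]; omega),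
          List.getElem_append_left (by rw [hAlen]; omega)]
      simp [hA]
    -- m[i-1][0]
    have hprev0 : PySem.List.pyGetD ((List.range N).map (fun (j : Nat) => a11 + ((t - 1 : Nat) : Int) * d + (j : Int) * c)) 0 0
        = a11 + ((t - 1 : Nat) : Int) * d := by
      rw [PySem.List.pyGetD_zero, List.getD_eq_getElem _ _ (by simp; omega)]
      simp
    -- m[i] = untouched zero row
    have hcur : PySem.List.pyGetD (A ++ List.replicate (N - t) (List.replicate N (0:Int))) (t : Int) []
        = List.replicate N 0 := by
      rw [PySem.List.pyGetD_natCast, List.getD_eq_getElem _ _ (by rw [hlenM]; omega),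
          List.getElem_append_right (by omega)]
      simp [hAlen]
    rw [hprev, hprev0, hcur]
    -- setting cell 0 of the zero row
    have hz : List.replicate N (0:Int) = 0 :: List.replicate (N - 1) 0 := by
      have : N = (N - 1) + 1 := by omega
      rw [this]; simp [List.replicate_succ]
    have hset0 : PySem.List.pySetD (List.replicate N (0:Int)) 0 (a11 + ((t - 1 : Nat) : Int) * d + d)
        = (a11 + ((t - 1 : Nat) : Int) * d + d) :: List.replicate (N - 1) 0 := by
      rw [hz, PySem.List.pySetD_of_nonneg _ _ le_rfl]
      rfl
    rw [hset0]
    -- inner loop via the two row lemmas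
    rw [pvFoldl_innerBody_set c (t : Int) (by positivity) _ _ _ (by rw [hlenM]; exact_mod_cast by omega),
        pvRow_fill c _ N hN N hN le_rfl]
    have hsval : a11 + ((t - 1 : Nat) : Int) * d + d = a11 + (t : Int) * d := by
      have : ((t - 1 : Nat) : Int) = (t : Int) - 1 := by omega
      rw [this]; ring
    rw [PySem.List.pySetD_natCast]
    have hrep : List.replicate (N - t) (List.replicate N (0:Int)) = List.replicate N 0 :: List.replicate (N - (t+1)) (List.replicate N 0) := by
      have : N - t = (N - (t + 1)) + 1 := by omega
      rw [this, List.replicate_succ]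
    have hsetrow : (A ++ List.replicate (N - t) (List.replicate N (0:Int))).set t
        ((List.range N).map (fun (j : Nat) => a11 + ((t-1:Nat):Int) * d + d + (j : Int) * c) ++ List.replicate (N - N) 0)
        = A ++ ((List.range N).map (fun (j : Nat) => a11 + ((t-1:Nat):Int) * d + d + (j : Int) * c) ++ List.replicate (N - N) 0) :: List.replicate (N - (t+1)) (List.replicate N 0) := by
      rw [hrep]
      have := pvSet_append_len A (List.replicate N (0:Int))
        ((List.range N).map (fun (j : Nat) => a11 + ((t-1:Nat):Int) * d + d + (j : Int) * c) ++ List.replicate (N - N) 0)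
        (List.replicate (N - (t+1)) (List.replicate N 0))
      rwa [hAlen] at this
    have hrow : (List.range N).map (fun (j : Nat) => a11 + ((t-1:Nat):Int) * d + d + (j : Int) * c) ++ List.replicate (N - N) 0
        = (List.range N).map (fun (j : Nat) => a11 + ((t:Nat) : Int) * d + (j : Int) * c) := by
      rw [Nat.sub_self, List.replicate_zero, List.append_nil]
      apply List.map_congr_left
      intro j _
      rw [show ((t - 1 : Nat) : Int) = (t : Int) - 1 by omega]
      ring
    rw [hsetrow, hrow, List.range_succ, List.map_append, List.append_assoc]
    rfl

theorem pvMain (n c d : Int) (a : List Int) (_ha : a ≠ []) (hn : 1 ≤ n) :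
    construct_matrix n c d a = construct_matrix_alt n c d a := by
  obtain ⟨N, hnN⟩ : ∃ N : Nat, n = (N : Int) := ⟨n.toNat, (Int.toNat_of_nonneg (by omega)).symm⟩
  have hN : 1 ≤ N := by omega
  subst hnN
  unfold construct_matrix construct_matrix_alt
  dsimp only
  set a11 := (PySem.List.min? a id).getD 0 with ha11
  have hzi : List.replicate N (0:Int) = 0 :: List.replicate (N-1) 0 := by
    rw [show N = (N-1)+1 by omega]; simp [List.replicate_succ]
  have hzm : List.replicate N (List.replicate N (0:Int))
      = List.replicate N 0 :: List.replicate (N-1) (List.replicate N 0) := by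
    rw [show N = (N-1)+1 by omega]; simp [List.replicate_succ]
  have hm0 : (PySem.List.pyRange 0 (N:Int)).map (fun _ => List.replicate ((N:Int)).toNat (0:Int))
      = List.replicate N (List.replicate N 0) := by
    rw [PySem.List.pyRange_zero_nat, List.map_map]
    simp [Function.comp_def, List.map_const']
  rw [hm0]
  -- m[0][0] = a11
  have hget0 : PySem.List.pyGetD (List.replicate N (List.replicate N (0:Int))) 0 [] = List.replicate N 0 := by
    rw [hzm, PySem.List.pyGetD_zero_cons]
  have hsetrow0 : PySem.List.pySetD (List.replicate N (0:Int)) 0 a11 = a11 :: List.replicate (N-1) 0 := by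
    rw [hzi, PySem.List.pySetD_of_nonneg _ _ le_rfl]; rfl
  rw [hget0, hsetrow0]
  -- first j-loop fills row 0
  rw [pvFoldl_innerBody_set c 0 le_rfl _ _ _ (by simp; omega),
      pvRow_fill c a11 N hN N hN le_rfl]
  have hrow0 : (List.range N).map (fun (j : Nat) => a11 + (j : Int) * c) ++ List.replicate (N - N) 0
      = (List.range N).map (fun (j : Nat) => a11 + ((0:Nat) : Int) * d + (j : Int) * c) := by
    rw [Nat.sub_self, List.replicate_zero, List.append_nil]
    apply List.map_congr_left; intro j _; push_cast; ring
  rw [hrow0]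
  have hsetm : PySem.List.pySetD (List.replicate N (List.replicate N (0:Int))) 0
      ((List.range N).map (fun (j : Nat) => a11 + ((0:Nat) : Int) * d + (j : Int) * c))
      = (List.range 1).map (fun (i : Nat) => (List.range N).map (fun (j : Nat) => a11 + (i : Int) * d + (j : Int) * c))
        ++ List.replicate (N-1) (List.replicate N 0) := by
    rw [hzm, PySem.List.pySetD_of_nonneg _ _ le_rfl]
    simp [List.range_succ]
  rw [hsetm, pvOuter_inv a11 c d N hN N hN le_rfl, Nat.sub_self, List.replicate_zero, List.append_nil,
      PySem.List.pyRange_zero_nat, List.map_map]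
  apply List.map_congr_left
  intro i _
  simp

-- ===== VERDICT (by name: the statement is the Claim_ definition above) =====
theorem construct_matrix_spec : Claim_equal_construct_matrix := by
  intro n c d a _ hp
  unfold Spec_construct_matrix
  exact pvMain n c d a hp.1 hp.2
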